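-- pv_equiv track=rewrite | github.com/whyj107/CodeWar | 20221227_The 12 Days of Christmas.py | song_sorter
-- ===== SOURCE A (Python) =====
-- def song_sorter(lines):
--     tmp = []
--     for idx, line in enumerate(lines):
--         t = line.split(' ')[0]
--         if t.isnumeric():
--             tmp.append((int(t), line))
--         elif t == 'On':
--             tmp.append((13, line))
--         elif t == 'a':
--             tmp.append((1, line))
--     return [j for i, j in sorted(tmp, reverse=True)]
-- ===== SOURCE B (Python) =====
-- def _rank(line):
--     t = line.split(' ')[0]
--     if t.isnumeric():
--         return int(t)
--     elif t == 'On':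
--         return 13
--     elif t == 'a':
--         return 1
--     return None
--
--
-- def song_sorter(lines):
--     buckets = {}
--     for line in lines:
--         n = _rank(line)
--         if n is None:
--             continue
--         buckets[n] = buckets.get(n, []) + [line]
--     out = []
--     for k in sorted(buckets.keys(), reverse=True):
--         out += sorted(buckets[k], reverse=True)
--     return out
-- ===== Notes on version B (the rewrite author's own statement) =====
-- stated objective: alternative
-- what changed: B replaces A's single descending sort over (rank, line) tuples by a group-by dictionary keyed on the rank, then emits the buckets in descending key order with each bucket sorted descending on its own.
import Mathlib
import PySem

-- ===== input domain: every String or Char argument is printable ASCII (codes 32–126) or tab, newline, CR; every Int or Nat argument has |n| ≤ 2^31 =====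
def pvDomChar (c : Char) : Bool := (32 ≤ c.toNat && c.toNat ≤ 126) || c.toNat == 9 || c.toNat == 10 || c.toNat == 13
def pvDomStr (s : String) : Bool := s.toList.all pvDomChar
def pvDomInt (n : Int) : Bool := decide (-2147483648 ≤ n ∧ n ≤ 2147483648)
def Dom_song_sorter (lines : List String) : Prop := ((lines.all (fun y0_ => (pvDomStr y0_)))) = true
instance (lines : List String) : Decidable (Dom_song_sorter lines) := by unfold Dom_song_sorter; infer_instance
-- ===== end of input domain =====

-- B groups the qualifying lines in a dict keyed by their integer rank and emits the buckets
-- in descending key order (each bucket sorted descending), instead of A's one total sort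
-- over (rank, line) tuples; same result, alternative algorithm.

-- ===== PORT A =====
-- 't.isnumeric()' is ported as strIsdigit: the two agree on the printable-ASCII domain.
-- 'int(t)' is guarded by that test, so ofStr? is always 'some' there; '.getD 0' is never used.
-- "line.split(' ')" is never empty, so '[0]' never raises. The enumerate index A binds is never read.
def song_sorter (lines : List String) : List String :=
  let tmp : List (Int × String) := lines.foldl (fun tmp line =>
    let t : String := (PySem.List.pyGet? ((PySem.Str.split? line " ").getD []) 0).getD ""
    if PySem.Str.strIsdigit t then tmp ++ [((PySem.Int.ofStr? t).getD 0, line)]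
    else if t = "On" then tmp ++ [((13 : Int), line)]
    else if t = "a" then tmp ++ [((1 : Int), line)]
    else tmp) []
  (PySem.List.sorted2 tmp (fun p => p.1) (fun p => p.2) true).map (fun p => p.2)

-- ===== PORT B =====
-- _rank of Source B; same porting notes on isnumeric/int/split as for A.
def pvRank (line : String) : Option Int :=
  let t : String := (PySem.List.pyGet? ((PySem.Str.split? line " ").getD []) 0).getD ""
  if PySem.Str.strIsdigit t then some ((PySem.Int.ofStr? t).getD 0)
  else if t = "On" then some 13
  else if t = "a" then some 1
  else none

-- 'buckets[n] = buckets.get(n, []) + [line]' is Dict.modify; 'buckets[k]' with k a present key is getD.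
def song_sorter_alt (lines : List String) : List String :=
  let buckets : PySem.Dict Int (List String) := lines.foldl (fun d line =>
    match pvRank line with
    | some n => d.modify n [] (fun l => l ++ [line])
    | none => d) PySem.Dict.empty
  (PySem.List.sorted buckets.keys (fun k => k) true).foldl
    (fun out k => out ++ PySem.List.sorted (buckets.getD k []) (fun s => s) true) []

-- ===== PRECONDITION & SPEC =====
def Spec_song_sorter (lines : List String) (out : List String) : Prop := out = song_sorter_alt lines
instance (lines : List String) (out : List String) : Decidable (Spec_song_sorter lines out) := by unfold Spec_song_sorter; infer_instance

-- ===== CLAIM (what is proved, stated in full; the proofs are below) =====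
def Claim_equal_song_sorter : Prop := ∀ (lines : List String), Dom_song_sorter lines → Spec_song_sorter lines (song_sorter lines)

-- ===== LEMMAS AND PROOFS =====

-- the loop bodies of the two ports, named so the proofs can speak about them
def pvStepA : List (Int × String) → String → List (Int × String) := fun tmp line =>
  let t : String := (PySem.List.pyGet? ((PySem.Str.split? line " ").getD []) 0).getD ""
  if PySem.Str.strIsdigit t then tmp ++ [((PySem.Int.ofStr? t).getD 0, line)]
  else if t = "On" then tmp ++ [((13 : Int), line)]
  else if t = "a" then tmp ++ [((1 : Int), line)]
  else tmp

def pvStepB : PySem.Dict Int (List String) → String → PySem.Dict Int (List String) := fun d line =>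
  match pvRank line with
  | some n => d.modify n [] (fun l => l ++ [line])
  | none => d

-- the common classification as a filterMap producer of (rank, line) pairs
def pvG (line : String) : Option (Int × String) := (pvRank line).map (fun n => (n, line))

-- A's accumulation loop produces exactly the filterMap of pvG
theorem pv_stepA_eq (tmp : List (Int × String)) (line : String) :
    pvStepA tmp line = tmp ++ (pvG line).toList := by
  simp only [pvStepA, pvG, pvRank]
  split_ifs <;> simp

theorem pv_tmpA (lines : List String) (acc : List (Int × String)) :
    lines.foldl pvStepA acc = acc ++ lines.filterMap pvG := by
  induction lines generalizing acc with
  | nil => simp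
  | cons line rest ih =>
    rw [List.foldl_cons, pv_stepA_eq, List.filterMap_cons]
    cases h : pvG line <;> simp [ih]

-- B's dict-building loop, re-indexed over the same filterMap
theorem pv_stepB_eq (d : PySem.Dict Int (List String)) (line : String) :
    pvStepB d line = (pvG line).elim d (fun p => d.modify p.1 [] (fun l => l ++ [p.2])) := by
  unfold pvStepB pvG
  cases pvRank line
  · rfl
  · rfl

theorem pv_tmpB (lines : List String) (d : PySem.Dict Int (List String)) :
    lines.foldl pvStepB d
      = (lines.filterMap pvG).foldl (fun d p => d.modify p.1 [] (fun l => l ++ [p.2])) d := by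
  induction lines generalizing d with
  | nil => rfl
  | cons line rest ih =>
    rw [List.foldl_cons, pv_stepB_eq, List.filterMap_cons]
    cases h : pvG line <;> simp [ih]

-- a filtered bucket, re-tagged with its key, is the filtered list itself
theorem pv_retag (l : List (Int × String)) (k : Int) :
    ((l.filter (fun p => p.1 == k)).map (fun p => p.2)).map (fun s => (k, s))
      = l.filter (fun p => p.1 == k) := by
  rw [List.map_map]
  have h : ∀ p ∈ l.filter (fun p : Int × String => p.1 == k),
      ((fun s => (k, s)) ∘ (fun p : Int × String => p.2)) p = id p := by
    intro p hp
    have hpk := List.of_mem_filter hp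
    simp only [beq_iff_eq] at hpk
    simp [Function.comp, ← hpk]
  rw [List.map_congr_left h, List.map_id]

-- grouping by a complete nodup key list is a permutation of the original list
theorem pv_group_perm (ks : List Int) (l : List (Int × String)) (hnd : ks.Nodup)
    (hc : ∀ p ∈ l, p.1 ∈ ks) :
    (ks.flatMap (fun k => l.filter (fun p => p.1 == k))).Perm l := by
  induction ks generalizing l with
  | nil =>
    have : l = [] := List.eq_nil_iff_forall_not_mem.mpr (fun p hp => by simpa using hc p hp)
    simp [this]
  | cons k ks ih =>
    rw [List.flatMap_cons]
    have hkne : ∀ k' ∈ ks, k' ≠ k := by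
      intro k' hk' he
      exact (List.nodup_cons.mp hnd).1 (he ▸ hk')
    have hrw : ks.flatMap (fun k' => l.filter (fun p => p.1 == k'))
        = ks.flatMap (fun k' => (l.filter (fun p => !(p.1 == k))).filter (fun p => p.1 == k')) := by
      rw [List.flatMap_def, List.flatMap_def]
      congr 1
      apply List.map_congr_left
      intro k' hk'
      rw [List.filter_filter]
      apply List.filter_congr
      intro p hp
      by_cases h : p.1 = k'
      · simp [h, hkne k' hk']
      · simp [h]
    rw [hrw]
    have hperm := ih (l.filter (fun p => !(p.1 == k))) (List.nodup_cons.mp hnd).2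
      (fun p hp => by
        have h1 := List.of_mem_filter hp
        have h2 := hc p (List.mem_of_mem_filter hp)
        simp only [Bool.not_eq_eq_eq_not, Bool.not_true, beq_eq_false_iff_ne, ne_eq] at h1
        rcases List.mem_cons.mp h2 with h | h
        · exact absurd h h1
        · exact h)
    exact (hperm.append_left _).trans (List.filter_append_perm _ l)

-- sorted2's tuple comparison is the lexicographic order on pairs
theorem pv_lex_cmp (a b : Int × String) :
    (decide (a.1 < b.1) || (!decide (b.1 < a.1) && decide (a.2 < b.2)))
      = decide (toLex a < toLex b) := by
  rcases lt_trichotomy a.1 b.1 with h | h | h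
  · simp [Prod.Lex.lt_iff, h, asymm h]
  · simp [Prod.Lex.lt_iff, h]
  · simp [Prod.Lex.lt_iff, asymm h, ne_of_gt h, h]

theorem pv_sorted2_lex (xs : List (Int × String)) :
    PySem.List.sorted2 xs (fun p => p.1) (fun p => p.2) true
      = PySem.List.sorted xs (fun p => toLex p) true := by
  rw [PySem.List.sorted_rev_eq_foldl_insertBy]
  show List.foldl (fun acc x => PySem.List.insertBy
      (fun a b => decide (b.1 < a.1) || (!decide (a.1 < b.1) && decide (b.2 < a.2))) x acc) [] xs
    = List.foldl (fun acc x => PySem.List.insertBy (fun a b => decide (toLex b < toLex a)) x acc) [] xs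
  congr 1
  funext acc x
  congr 1
  funext a b
  exact pv_lex_cmp b a

theorem pv_main (lines : List String) : song_sorter lines = song_sorter_alt lines := by
  have hA : song_sorter lines
      = (PySem.List.sorted (lines.filterMap pvG) (fun p => toLex p) true).map (fun p => p.2) := by
    show (PySem.List.sorted2 (lines.foldl pvStepA []) (fun p => p.1) (fun p => p.2) true).map (fun p => p.2)
      = _
    rw [pv_tmpA lines [], List.nil_append, pv_sorted2_lex]
  set L : List (Int × String) := lines.filterMap pvG with hLdef
  have hbucket : ∀ k : Int,
      (L.foldl (fun d p => d.modify p.1 [] (fun l => l ++ [p.2])) PySem.Dict.empty).getD k []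
        = (L.filter (fun p => p.1 == k)).map (fun p => p.2) := by
    intro k
    simpa using PySem.Dict.getD_foldl_modify_append L PySem.Dict.empty k
  have hkeys :
      (L.foldl (fun d p => d.modify p.1 [] (fun l => l ++ [p.2])) PySem.Dict.empty).keys
        = PySem.Set.ofList (L.map (fun p => p.1)) := by
    have h := PySem.Dict.keys_foldl_modify_key (κ := Int) (ν := List String) L (fun p => p.1) []
      (fun _ p => fun l => l ++ [p.2]) PySem.Dict.empty
    simpa [PySem.Set.update, PySem.Set.ofList_eq_foldl] using h
  set ks : List Int :=
    PySem.List.sorted (PySem.Set.ofList (L.map (fun p => p.1))) (fun k => k) true with hksdef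
  have hB : song_sorter_alt lines
      = ks.flatMap (fun k =>
          PySem.List.sorted ((L.filter (fun p => p.1 == k)).map (fun p => p.2)) (fun s => s) true) := by
    show (PySem.List.sorted (lines.foldl pvStepB PySem.Dict.empty).keys (fun k => k) true).foldl
        (fun out k => out ++ PySem.List.sorted ((lines.foldl pvStepB PySem.Dict.empty).getD k []) (fun s => s) true) []
      = _
    rw [pv_tmpB, ← hLdef, hkeys, ← hksdef]
    simp only [hbucket]
    rw [PySem.List.foldl_append_eq_flatMap, List.nil_append]
  set ys : List (Int × String) := ks.flatMap (fun k =>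
    (PySem.List.sorted ((L.filter (fun p => p.1 == k)).map (fun p => p.2)) (fun s => s) true).map
      (fun s => (k, s))) with hysdef
  have hmap : song_sorter_alt lines = ys.map (fun p => p.2) := by
    rw [hB, hysdef, List.map_flatMap]
    simp [List.map_map, Function.comp_def]
  have hnodupKeys : (PySem.Set.ofList (L.map (fun p => p.1))).Nodup := PySem.Set.nodup_ofList _
  have hksperm : ks.Perm (PySem.Set.ofList (L.map (fun p => p.1))) :=
    PySem.List.sorted_perm _ _ _
  have hnodupks : ks.Nodup := hksperm.nodup_iff.mpr hnodupKeys
  have hperm : ys.Perm L := by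
    have h1 : ys.Perm (ks.flatMap (fun k => L.filter (fun p => p.1 == k))) := by
      apply List.Perm.flatMap_left
      intro k _
      have hp : (PySem.List.sorted ((L.filter (fun p => p.1 == k)).map (fun p => p.2)) (fun s => s) true).Perm
          ((L.filter (fun p => p.1 == k)).map (fun p => p.2)) := PySem.List.sorted_perm _ _ _
      have hpm := hp.map (fun s => (k, s))
      rw [pv_retag L k] at hpm
      exact hpm
    have h2 : (ks.flatMap (fun k => L.filter (fun p => p.1 == k))).Perm
        ((PySem.Set.ofList (L.map (fun p => p.1))).flatMap (fun k => L.filter (fun p => p.1 == k))) :=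
      List.Perm.flatMap_right _ hksperm
    have h3 : ((PySem.Set.ofList (L.map (fun p => p.1))).flatMap
        (fun k => L.filter (fun p => p.1 == k))).Perm L := by
      apply pv_group_perm _ _ hnodupKeys
      intro p hp
      rw [PySem.Set.mem_ofList]
      exact List.mem_map.mpr ⟨p, hp, rfl⟩
    exact (h1.trans h2).trans h3
  have hpairY : ys.Pairwise (fun a b : Int × String => toLex b ≤ toLex a) := by
    rw [hysdef, List.flatMap_def]
    apply List.pairwise_flatten.mpr
    constructor
    · intro l' hl'
      obtain ⟨k, _, rfl⟩ := List.mem_map.mp hl'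
      refine List.Pairwise.map _ ?_ (PySem.List.sorted_pairwise_rev _ (fun s => s))
      intro s s' h
      exact Prod.Lex.le_iff.mpr (Or.inr ⟨rfl, h⟩)
    · have hks2 : ks.Pairwise (fun k₁ k₂ => k₂ < k₁) := by
        have hle := PySem.List.sorted_pairwise_rev (PySem.Set.ofList (L.map (fun p => p.1))) (fun k => k)
        rw [← hksdef] at hle
        exact (hle.and hnodupks).imp (fun h => lt_of_le_of_ne h.1 (Ne.symm h.2))
      refine List.Pairwise.map _ ?_ hks2
      intro k₁ k₂ hlt x hx y hy
      obtain ⟨s, _, rfl⟩ := List.mem_map.mp hx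
      obtain ⟨s', _, rfl⟩ := List.mem_map.mp hy
      exact Prod.Lex.le_iff.mpr (Or.inl (by simpa using hlt))
  have hpairA : (PySem.List.sorted L (fun p => toLex p) true).Pairwise
      (fun a b : Int × String => toLex b ≤ toLex a) :=
    PySem.List.sorted_pairwise_rev L (fun p => toLex p)
  have heq : PySem.List.sorted L (fun p => toLex p) true = ys := by
    apply PySem.List.eq_of_perm_of_pairwise_le_of_injective
      (key := fun p : Int × String => OrderDual.toDual (toLex p))
    · intro a b h
      simpa using h
    · exact (PySem.List.sorted_perm L _ true).trans hperm.symm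
    · exact hpairA.imp (fun h => OrderDual.toDual_le_toDual.mpr h)
    · exact hpairY.imp (fun h => OrderDual.toDual_le_toDual.mpr h)
  rw [hA, hmap, heq]

-- ===== VERDICT (by name: the statement is the Claim_ definition above) =====
theorem song_sorter_spec : Claim_equal_song_sorter := by
  intro lines _
  unfold Spec_song_sorter
  exact pv_main lines
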